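-- pv_equiv track=rewrite | github.com/xxNine1Eightxx/GLYPHNOTES_GLYPH_STRING_COMBOS | sigils/sigil_enumerator.py | dep_sequences
-- ===== SOURCE A (Python) =====
-- from itertools import product, combinations
--
-- def dep_sequences(max_dep_len):
--     base = [
--         ["MX"], ["MY"], ["R90"], ["R180"], ["R270"],
--         ["FL(1)"], ["FL(2)"], ["SW(1,2)"], ["MV(1,2)"], ["SC(2)"],
--         ["T(1,0)"], ["T(0,1)"]
--     ]
--     out = []
--     for L in range(1, max_dep_len+1):
--         for combo in product(base, repeat=L):
--             seq = [op for chunk in combo for op in chunk]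
--             out.append(seq)
--     return out
-- ===== SOURCE B (Python) =====
-- def dep_sequences(max_dep_len):
--     symbols = ["MX", "MY", "R90", "R180", "R270",
--                "FL(1)", "FL(2)", "SW(1,2)", "MV(1,2)", "SC(2)",
--                "T(1,0)", "T(0,1)"]
--     out = []
--     prev = [[]]
--     for _ in range(1, max_dep_len + 1):
--         cur = [p + [s] for p in prev for s in symbols]
--         out.extend(cur)
--         prev = cur
--     return out
-- ===== Notes on version B (the rewrite author's own statement) =====
-- stated objective: alternative
-- what changed: B keeps the list of sequences of the previous length and extends each by one symbol to build the next level (incremental prefix extension), instead of calling product(base, repeat=L) from scratch for every length and flattening singleton chunks.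
import Mathlib
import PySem

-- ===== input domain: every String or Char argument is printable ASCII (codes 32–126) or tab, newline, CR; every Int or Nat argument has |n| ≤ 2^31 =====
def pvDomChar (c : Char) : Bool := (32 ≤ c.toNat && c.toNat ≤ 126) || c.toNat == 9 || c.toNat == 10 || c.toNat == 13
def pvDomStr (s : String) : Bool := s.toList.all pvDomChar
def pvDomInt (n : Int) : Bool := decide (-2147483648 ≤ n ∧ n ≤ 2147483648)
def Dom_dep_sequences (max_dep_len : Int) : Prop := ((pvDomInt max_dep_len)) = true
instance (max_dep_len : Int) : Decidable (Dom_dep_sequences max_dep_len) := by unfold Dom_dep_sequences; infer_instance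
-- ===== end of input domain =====

-- B builds each length level by extending the previous level's sequences by one symbol,
-- instead of recomputing product(base, repeat=L) per length; same output, similar cost.

-- ===== PORT A =====
def pvBase : List (List String) :=
  [["MX"], ["MY"], ["R90"], ["R180"], ["R270"],
   ["FL(1)"], ["FL(2)"], ["SW(1,2)"], ["MV(1,2)"], ["SC(2)"],
   ["T(1,0)"], ["T(0,1)"]]

-- itertools.product(base, repeat=L): leftmost position varies slowest
def pvProd (base : List (List String)) : Nat → List (List (List String))
  | 0 => [[]]
  | n+1 => base.flatMap (fun x => (pvProd base n).map (fun t => x :: t))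

def dep_sequences (max_dep_len : Int) : List (List String) :=
  (PySem.List.pyRange 1 (max_dep_len + 1) 1).foldl
    (fun out L =>
      (pvProd pvBase L.toNat).foldl
        (fun out combo => out ++ [combo.flatMap (fun chunk => chunk)]) out)
    []

-- ===== PORT B =====
def pvSyms : List String :=
  ["MX", "MY", "R90", "R180", "R270",
   "FL(1)", "FL(2)", "SW(1,2)", "MV(1,2)", "SC(2)",
   "T(1,0)", "T(0,1)"]

def dep_sequences_alt (max_dep_len : Int) : List (List String) :=
  ((PySem.List.pyRange 1 (max_dep_len + 1) 1).foldl
    (fun st _ =>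
      let cur := st.2.flatMap (fun p => pvSyms.map (fun s => p ++ [s]))
      (st.1 ++ cur, cur))
    ([], [[]])).1

-- ===== PRECONDITION & SPEC =====
def Spec_dep_sequences (max_dep_len : Int) (out : List (List String)) : Prop := out = dep_sequences_alt max_dep_len
instance (max_dep_len : Int) (out : List (List String)) : Decidable (Spec_dep_sequences max_dep_len out) := by unfold Spec_dep_sequences; infer_instance

-- ===== CLAIM (what is proved, stated in full; the proofs are below) =====
def Claim_equal_dep_sequences : Prop := ∀ (max_dep_len : Int), Dom_dep_sequences max_dep_len → Spec_dep_sequences max_dep_len (dep_sequences max_dep_len)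

-- ===== LEMMAS AND PROOFS =====

-- A's level-L sequences (product mapped through chunk flattening)
def pvLevel (k : Nat) : List (List String) :=
  (pvProd pvBase k).map (fun combo => combo.flatMap (fun chunk => chunk))

lemma pvLevel_def (k : Nat) :
    pvLevel k = (pvProd pvBase k).map (fun combo => combo.flatMap (fun chunk => chunk)) := rfl

lemma pvProd_snoc (base : List (List String)) (k : Nat) :
    pvProd base (k+1) = (pvProd base k).flatMap (fun t => base.map (fun x => t ++ [x])) := by
  induction k with
  | zero =>
      show base.flatMap (fun x => [[x]]) = _
      simp [← List.map_eq_flatMap, pvProd]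
  | succ k ih =>
      conv_lhs => rw [show pvProd base (k+1+1)
        = base.flatMap (fun x => (pvProd base (k+1)).map (fun t => x :: t)) from rfl, ih]
      conv_rhs => rw [show pvProd base (k+1)
        = base.flatMap (fun x => (pvProd base k).map (fun t => x :: t)) from rfl]
      simp [List.flatMap_assoc, List.flatMap_map, List.map_flatMap, List.map_map,
        Function.comp_def, List.cons_append]

lemma pvBase_eq : pvBase = pvSyms.map (fun s => [s]) := by decide

lemma pvLevel_step (k : Nat) :
    pvLevel (k+1) = (pvLevel k).flatMap (fun p => pvSyms.map (fun s => p ++ [s])) := by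
  unfold pvLevel
  rw [pvProd_snoc, pvBase_eq]
  simp [List.map_flatMap, List.flatMap_map, List.map_map, Function.comp_def,
    List.flatten_append]

lemma pvFoldA_append (xs : List (List (List String))) (out : List (List String)) :
    xs.foldl (fun out combo => out ++ [combo.flatMap (fun chunk => chunk)]) out
      = out ++ xs.map (fun combo => combo.flatMap (fun chunk => chunk)) := by
  induction xs generalizing out with
  | nil => simp
  | cons x xs ih => rw [List.foldl_cons, ih]; simp

lemma pvMain (n : Nat) :
    (PySem.List.pyRange 1 ((n : Int) + 1) 1).foldl
      (fun st _ =>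
        let cur := st.2.flatMap (fun p => pvSyms.map (fun s => p ++ [s]))
        (st.1 ++ cur, cur))
      (([] : List (List String)), [([] : List String)])
    = ((PySem.List.pyRange 1 ((n : Int) + 1) 1).foldl
        (fun out L =>
          (pvProd pvBase L.toNat).foldl
            (fun out combo => out ++ [combo.flatMap (fun chunk => chunk)]) out)
        [], pvLevel n) := by
  induction n with
  | zero =>
      rw [PySem.List.pyRange_one_eq_nil (by norm_num)]
      simp [pvLevel, pvProd]
  | succ n ih =>
      have h : PySem.List.pyRange 1 ((n : Int) + 1 + 1) 1
          = PySem.List.pyRange 1 ((n : Int) + 1) 1 ++ [(n : Int) + 1] := by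
        have := PySem.List.pyRange_one_succ_right (a := 1) (b := (n : Int) + 1) (by omega)
        simpa using this
      push_cast
      rw [h, List.foldl_append, List.foldl_append, ih]
      have ht : (((n : Int) + 1)).toNat = n + 1 := by omega
      simp only [List.foldl, ht, pvFoldA_append]
      rw [← pvLevel_def, pvLevel_step]

theorem pvEq (max_dep_len : Int) :
    dep_sequences max_dep_len = dep_sequences_alt max_dep_len := by
  unfold dep_sequences dep_sequences_alt
  rcases le_or_gt max_dep_len 0 with h | h
  · rw [PySem.List.pyRange_one_eq_nil (by omega)]
    rfl
  · obtain ⟨n, rfl⟩ : ∃ n : Nat, max_dep_len = (n : Int) :=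
      ⟨max_dep_len.toNat, (Int.toNat_of_nonneg (by omega)).symm⟩
    rw [pvMain n]

-- ===== VERDICT (by name: the statement is the Claim_ definition above) =====
theorem dep_sequences_spec : Claim_equal_dep_sequences := by
  intro m _
  unfold Spec_dep_sequences
  exact pvEq m
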